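-- pv_equiv track=rewrite | github.com/nadavcordova2/Subgame-perfect-Cooperation-in-Networks | check_SPE_state_machine.py | calculate_single_player_utility_by_graph
-- ===== SOURCE A (Python) =====
-- import itertools
--
-- def calculate_single_player_utility_by_graph(n: int, games: dict, player: int, players_actions):
--     """
--     Given a graph, a player, and the games on each of his nodes, calculate the utilities matching for every possible
--     combinations of actions of all the players in the (one shot) game.
--
--     :param n: The number of players.
--     :param games: A dictionary mapping  edges to the matching two player game.
--     :param player: The player we want to calculate his utilities.
--     :param players_actions: players_actions[i] is a list of possible actions for player i.
--
--     :return: The utilities for the given player for every possible combination of actions in the one shot game.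
--     """
--     utilities = {}
--     for element in itertools.product(*players_actions):
--         action = "".join(element)
--         act_utility = 0
--         for k in range(n):
--             if k != player and (k, player) in games:
--                 act_utility += games[(k, player)][action[player] + action[k]]
--         utilities[action] = act_utility
--
--     return utilities
-- ===== SOURCE B (Python) =====
-- import itertools
--
--
-- def calculate_single_player_utility_by_graph(n: int, games: dict, player: int, players_actions):
--     # Precompute the neighbor list from the games dict (instead of scanning range(n)),
--     # tabulate the utility of every relevant sub-assignment (player's action + each
--     # neighbor's action), then materialize the full action combinations by table lookup.
--     neighbors = sorted(k for (k, p) in games if p == player and k != player and 0 <= k < n)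
--     if not neighbors:
--         return {"".join(element): 0 for element in itertools.product(*players_actions)}
--     neighbor_games = [games[(k, player)] for k in neighbors]
--     table = {}
--     for combo in itertools.product(players_actions[player],
--                                    *(players_actions[k] for k in neighbors)):
--         table[combo] = sum(g[combo[0] + a] for g, a in zip(neighbor_games, combo[1:]))
--     utilities = {}
--     for element in itertools.product(*players_actions):
--         key = (element[player],) + tuple(element[k] for k in neighbors)
--         utilities["".join(element)] = table[key]
--     return utilities
-- ===== Notes on version B (the rewrite author's own statement) =====
-- stated objective: alternative
-- what changed: B precomputes the player's neighbor list and a utility table keyed by the relevant sub-assignment (player's action plus each neighbor's action), then fills each full action combination with one table lookup, instead of A's rescan of all n players and repeated dict lookups per combination.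
-- outside the precondition, e.g. on calculate_single_player_utility_by_graph(1, {(0, 1): {'aa': 7}}, 1, [['aa'], ['b']]): A returns {'aab': 7}, B raises KeyError; on calculate_single_player_utility_by_graph(1, {(0, 2): {'aa': 1}}, 2, [['a'], []]): A returns {}, B raises IndexError; on calculate_single_player_utility_by_graph(2, {(0, 1): {'ba': 5}}, 1, [['a'], ['b'], ['cc']]): A returns {'abcc': 5}, B returns {'abcc': 5}
import Mathlib
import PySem

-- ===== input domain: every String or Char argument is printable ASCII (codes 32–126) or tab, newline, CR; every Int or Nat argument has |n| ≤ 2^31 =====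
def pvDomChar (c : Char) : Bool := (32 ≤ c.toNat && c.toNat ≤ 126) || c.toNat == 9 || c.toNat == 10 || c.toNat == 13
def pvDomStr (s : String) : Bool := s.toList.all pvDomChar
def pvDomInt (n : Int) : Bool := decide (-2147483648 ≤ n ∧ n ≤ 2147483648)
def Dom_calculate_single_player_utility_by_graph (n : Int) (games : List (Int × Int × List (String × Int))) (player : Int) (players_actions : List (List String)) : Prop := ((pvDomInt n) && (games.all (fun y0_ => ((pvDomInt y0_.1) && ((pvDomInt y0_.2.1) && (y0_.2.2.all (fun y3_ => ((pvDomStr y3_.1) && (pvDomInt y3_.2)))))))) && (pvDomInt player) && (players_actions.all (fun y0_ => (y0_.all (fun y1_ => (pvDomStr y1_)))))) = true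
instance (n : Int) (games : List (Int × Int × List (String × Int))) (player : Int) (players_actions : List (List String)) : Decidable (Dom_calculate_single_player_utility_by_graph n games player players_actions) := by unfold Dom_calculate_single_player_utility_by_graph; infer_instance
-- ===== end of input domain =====

-- B precomputes the neighbor list and a utility table keyed by the relevant
-- sub-assignment (player's action and each neighbor's action), then fills every
-- full action combination by one table lookup, instead of rescanning all n
-- players for every combination (objective: alternative decomposition).

-- shared primitives: itertools.product, dict lookups, "".join
def pvProduct {α : Type} (ls : List (List α)) : List (List α) :=
  ls.foldr (fun l acc => l.flatMap (fun x => acc.map (x :: ·))) [[]]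

-- games[(k, player)] : first match in the association list (Python dict lookup)
def pvGame? (games : List (Int × Int × List (String × Int))) (k p : Int) : Option (List (String × Int)) :=
  (games.find? (fun e => e.1 == k && e.2.1 == p)).map (·.2.2)

-- g[key] for a two-player game dict, key handled as a list of code points
def pvLook (g : List (String × Int)) (key : List Char) : Option Int :=
  (g.find? (fun e => e.1.toList == key)).map (·.2)

-- "".join(element), as a list of code points
def pvJoin (element : List String) : List Char :=
  PySem.Chars.join [] (element.map String.toList)

-- ===== PORT A =====
def calculate_single_player_utility_by_graph (n : Int) (games : List (Int × Int × List (String × Int))) (player : Int) (players_actions : List (List String)) : List (String × Int) :=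
  ((pvProduct players_actions).foldl (fun (utilities : PySem.Dict String Int) element =>
      let action : List Char := pvJoin element
      let act_utility : Int := (PySem.List.pyRange 0 n 1).foldl (fun acc k =>
        if (k != player && (pvGame? games k player).isSome) then
          -- games[(k, player)][action[player] + action[k]]; the pyGetD/getD defaults
          -- are never reached inside Pre_ (Python raises there)
          acc + (pvLook ((pvGame? games k player).getD [])
                   [PySem.List.pyGetD action player ' ', PySem.List.pyGetD action k ' ']).getD 0
        else acc) 0
      utilities.insert (String.ofList action) act_utility)
    PySem.Dict.empty).items

-- ===== PORT B =====
def calculate_single_player_utility_by_graph_alt (n : Int) (games : List (Int × Int × List (String × Int))) (player : Int) (players_actions : List (List String)) : List (String × Int) :=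
  -- sorted(k for (k, p) in games if p == player and k != player and 0 <= k < n)
  let neighbors := PySem.List.sorted
    ((games.filter (fun e => e.2.1 == player && e.1 != player && decide (0 ≤ e.1) && decide (e.1 < n))).map (fun e => e.1))
    (fun x => x) false
  if neighbors = [] then
    ((pvProduct players_actions).foldl (fun (u : PySem.Dict String Int) element =>
        u.insert (String.ofList (pvJoin element)) 0) PySem.Dict.empty).items
  else
    let neighbor_games := neighbors.map (fun k => (pvGame? games k player).getD [])
    let table : PySem.Dict (List String) Int :=
      (pvProduct (PySem.List.pyGetD players_actions player [] ::
                  neighbors.map (fun k => PySem.List.pyGetD players_actions k []))).foldl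
        (fun t combo =>
          t.insert combo
            ((neighbor_games.zip combo.tail).foldl (fun acc ga =>
                acc + (pvLook ga.1 ((combo.headD "").toList ++ ga.2.toList)).getD 0) 0))
        PySem.Dict.empty
    ((pvProduct players_actions).foldl (fun (u : PySem.Dict String Int) element =>
        u.insert (String.ofList (pvJoin element))
          ((table.get? (PySem.List.pyGetD element player "" ::
                        neighbors.map (fun k => PySem.List.pyGetD element k ""))).getD 0))
      PySem.Dict.empty).items

-- ===== PRECONDITION & SPEC =====
-- Pre_ excludes exactly the corner inputs where A raises or where A's indexing of the
-- joined action string leaves the per-player action boundaries: when the player has at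
-- least one neighbor game ((k, player) in games with 0 <= k < n, k != player), every
-- action must be a single character, the player index must be a valid (possibly
-- negative) index into players_actions, every neighbor index must be in range, every
-- relevant two-character key must be present in its neighbor game, and the (key, partner)
-- pairs of the games association list must be duplicate-free (a Python dict cannot
-- carry duplicate keys anyway). On a few of the excluded inputs A still returns a value
-- (multi-character actions whose joined-string positions line up, or an empty action
-- product); B's natural algorithm raises there, so they stay outside the claim.
def Pre_calculate_single_player_utility_by_graph (n : Int) (games : List (Int × Int × List (String × Int))) (player : Int) (players_actions : List (List String)) : Prop :=
  (∀ e ∈ games, ¬ (e.2.1 = player ∧ e.1 ≠ player ∧ 0 ≤ e.1 ∧ e.1 < n)) ∨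
    ((games.map (fun e => (e.1, e.2.1))).Nodup ∧
     -(players_actions.length : Int) ≤ player ∧ player < players_actions.length ∧
     (∀ l ∈ players_actions, ∀ s ∈ l, s.toList.length = 1) ∧
     (∀ e ∈ games, (e.2.1 = player ∧ e.1 ≠ player ∧ 0 ≤ e.1 ∧ e.1 < n) →
        e.1 < (players_actions.length : Int) ∧
        ∀ a ∈ PySem.List.pyGetD players_actions player [],
        ∀ b ∈ PySem.List.pyGetD players_actions e.1 [],
        (pvLook ((pvGame? games e.1 player).getD []) (a.toList ++ b.toList)).isSome))
instance (n : Int) (games : List (Int × Int × List (String × Int))) (player : Int) (players_actions : List (List String)) : Decidable (Pre_calculate_single_player_utility_by_graph n games player players_actions) := by unfold Pre_calculate_single_player_utility_by_graph; infer_instance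

def pvWitness_calculate_single_player_utility_by_graph : Int × (List (Int × Int × List (String × Int))) × Int × List (List String) :=
  (2, [(0, 1, [("aa", 3), ("ab", -1), ("ba", 0), ("bb", 7)])], 1, [["a", "b"], ["a", "b"]])

def Spec_calculate_single_player_utility_by_graph (n : Int) (games : List (Int × Int × List (String × Int))) (player : Int) (players_actions : List (List String)) (out : List (String × Int)) : Prop := out = calculate_single_player_utility_by_graph_alt n games player players_actions
instance (n : Int) (games : List (Int × Int × List (String × Int))) (player : Int) (players_actions : List (List String)) (out : List (String × Int)) : Decidable (Spec_calculate_single_player_utility_by_graph n games player players_actions out) := by unfold Spec_calculate_single_player_utility_by_graph; infer_instance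

-- ===== CLAIM (what is proved, stated in full; the proofs are below) =====
def Claim_equal_calculate_single_player_utility_by_graph : Prop := ∀ (n : Int) (games : List (Int × Int × List (String × Int))) (player : Int) (players_actions : List (List String)), Dom_calculate_single_player_utility_by_graph n games player players_actions → Pre_calculate_single_player_utility_by_graph n games player players_actions → Spec_calculate_single_player_utility_by_graph n games player players_actions (calculate_single_player_utility_by_graph n games player players_actions)

-- ===== LEMMAS AND PROOFS =====

-- proof-side name for A's inner filter: the neighbors in increasing order
def pvNeighbors (n : Int) (games : List (Int × Int × List (String × Int))) (player : Int) : List Int :=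
  (PySem.List.pyRange 0 n 1).filter (fun k => k != player && (pvGame? games k player).isSome)

-- proof-side name for B's neighbor candidates read off the games list
def pvCands (n : Int) (games : List (Int × Int × List (String × Int))) (player : Int) : List Int :=
  (games.filter (fun e => e.2.1 == player && e.1 != player && decide (0 ≤ e.1) && decide (e.1 < n))).map (fun e => e.1)

-- membership in a cartesian product, one step
theorem pv_mem_product_cons {α : Type} (l : List α) (ls : List (List α)) (x : List α) :
    x ∈ pvProduct (l :: ls) ↔ ∃ a t, x = a :: t ∧ a ∈ l ∧ t ∈ pvProduct ls := by
  simp [pvProduct, List.mem_flatMap, List.mem_map]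
  constructor
  · rintro ⟨a, ha, t, ht, rfl⟩; exact ⟨a, t, rfl, ha, ht⟩
  · rintro ⟨a, t, rfl, ha, ht⟩; exact ⟨a, ha, t, ht, rfl⟩

-- members of a product have the product's arity and componentwise membership
theorem pv_product_spec {α : Type} (ls : List (List α)) (x : List α) (hx : x ∈ pvProduct ls) :
    x.length = ls.length ∧ ∀ i (h : i < ls.length), ∀ (h' : i < x.length), x[i] ∈ ls[i] := by
  induction ls generalizing x with
  | nil => simp [pvProduct] at hx; subst hx; simp
  | cons l ls ih =>
    rw [pv_mem_product_cons] at hx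
    obtain ⟨a, t, rfl, ha, ht⟩ := hx
    obtain ⟨hlen, hmem⟩ := ih t ht
    refine ⟨by simp [hlen], ?_⟩
    intro i h h'
    cases i with
    | zero => simpa using ha
    | succ j => simpa using hmem j (by simpa using h) (by simpa using h')

-- a dict built by inserting f c at every c of a list
theorem pv_table_get? {κ ν : Type} [BEq κ] [LawfulBEq κ] [DecidableEq κ]
    (l : List κ) (f : κ → ν) (d : PySem.Dict κ ν) (k : κ) :
    (l.foldl (fun t c => t.insert c (f c)) d).get? k =
      if k ∈ l then some (f k) else d.get? k := by
  induction l generalizing d with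
  | nil => simp
  | cons c l ih =>
    simp only [List.foldl_cons, ih, PySem.Dict.get?_insert, List.mem_cons]
    by_cases hkl : k ∈ l <;> by_cases hkc : k = c <;> simp [hkl, hkc]

-- a guarded additive fold is the fold over the filtered list
theorem pv_foldl_if_filter {α : Type} (l : List α) (c : α → Bool) (f : α → Int) (a : Int) :
    l.foldl (fun acc k => if c k then acc + f k else acc) a =
      (l.filter c).foldl (fun acc k => acc + f k) a := by
  induction l generalizing a with
  | nil => rfl
  | cons x l ih => by_cases hx : c x <;> simp [hx, ih]

-- the joined action string of single-character actions, as a map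
theorem pv_join_singletons (element : List String)
    (h : ∀ s ∈ element, s.toList.length = 1) :
    pvJoin element = element.map (fun s => s.toList.headD ' ') := by
  have : element.map String.toList =
      (element.map (fun s => s.toList.headD ' ')).map (fun c => [c]) := by
    rw [List.map_map]
    apply List.map_congr_left
    intro s hs
    have := h s hs
    cases hsl : s.toList with
    | nil => simp [hsl] at this
    | cons c t => cases t with
      | nil => simp [hsl]
      | cons _ _ => simp [hsl] at this
  rw [pvJoin, this, PySem.Chars.join_nil_singletons]

-- a valid (possibly negative) index into a list of single-character strings:
-- the indexed character of the join is the indexed string's character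
theorem pv_join_getD (element : List String) (j : Int)
    (h : ∀ s ∈ element, s.toList.length = 1)
    (hlo : -(element.length : Int) ≤ j) (hhi : j < element.length) :
    (PySem.List.pyGetD element j "").toList =
      [PySem.List.pyGetD (pvJoin element) j ' '] := by
  rw [pv_join_singletons element h]
  have hm : PySem.List.pyGetD (element.map (fun s => s.toList.headD ' ')) j ' '
      = (PySem.List.pyGetD element j "").toList.headD ' ' := by
    simpa using PySem.List.pyGetD_map (fun s => s.toList.headD ' ') element j ""
  rw [hm]
  have hne : element ≠ [] := by
    intro hnil; subst hnil; simp at hhi hlo; omega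
  have hmem : PySem.List.pyGetD element j "" ∈ element := by
    apply PySem.List.pyGetD_mem
    constructor <;> simpa using by omega
  have := h _ hmem
  cases hsl : (PySem.List.pyGetD element j "").toList with
  | nil => simp [hsl] at this
  | cons c t => cases t with
    | nil => simp
    | cons _ _ => simp [hsl] at this

-- componentwise membership transfers through the same python index
theorem pv_elem_getD_mem (pa : List (List String)) (element : List String) (j : Int)
    (hel : element ∈ pvProduct pa)
    (hlo : -(pa.length : Int) ≤ j) (hhi : j < pa.length) :
    PySem.List.pyGetD element j "" ∈ PySem.List.pyGetD pa j [] := by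
  obtain ⟨hlen, hmem⟩ := pv_product_spec pa element hel
  rcases le_or_gt 0 j with hj | hj
  · rw [PySem.List.pyGetD_eq_getElem element "" hj (by omega),
        PySem.List.pyGetD_eq_getElem pa [] hj (by omega)]
    exact hmem j.toNat (by omega) (by omega)
  · have hj' : j = -(((-j).toNat : Nat) : Int) := by omega
    rw [hj', PySem.List.pyGetD_neg_natCast element _ "" (by omega) (by omega),
        PySem.List.pyGetD_neg_natCast pa _ [] (by omega) (by omega)]
    simp only [hlen]
    exact hmem _ (by omega) (by omega)

-- every member of a product member is single-character when all actions are
theorem pv_elem_single (pa : List (List String)) (element : List String)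
    (hel : element ∈ pvProduct pa)
    (h : ∀ l ∈ pa, ∀ s ∈ l, s.toList.length = 1) :
    ∀ s ∈ element, s.toList.length = 1 := by
  intro s hs
  obtain ⟨hlen, hmem⟩ := pv_product_spec pa element hel
  obtain ⟨i, hi, rfl⟩ := List.mem_iff_getElem.mp hs
  exact h _ (List.getElem_mem (by omega)) _ (hmem i (by omega) hi)

theorem pv_map_mem_product {α : Type} (N : List Int) (f1 : Int → α) (f2 : Int → List α)
    (h : ∀ k ∈ N, f1 k ∈ f2 k) : N.map f1 ∈ pvProduct (N.map f2) := by
  induction N with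
  | nil => simp [pvProduct]
  | cons k N ih =>
    rw [List.map_cons, List.map_cons, pv_mem_product_cons]
    exact ⟨f1 k, N.map f1, rfl, h k (by simp),
      ih (fun k hk => h k (List.mem_cons_of_mem _ hk))⟩

theorem pv_mem_neighbors_iff (n : Int) (games : List (Int × Int × List (String × Int)))
    (player k : Int) : k ∈ pvNeighbors n games player ↔
      ∃ e ∈ games, e.1 = k ∧ (e.2.1 = player ∧ e.1 ≠ player ∧ 0 ≤ e.1 ∧ e.1 < n) := by
  unfold pvNeighbors pvGame?
  rw [List.mem_filter, PySem.List.mem_pyRange_one, Bool.and_eq_true, bne_iff_ne,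
    Option.isSome_map, List.find?_isSome]
  constructor
  · rintro ⟨⟨hk0, hkn⟩, hne, e, he, hc⟩
    rw [Bool.and_eq_true, beq_iff_eq, beq_iff_eq] at hc
    exact ⟨e, he, hc.1, hc.2, hc.1 ▸ hne, hc.1 ▸ hk0, hc.1 ▸ hkn⟩
  · rintro ⟨e, he, h1, h2, hne, hk0, hkn⟩
    subst h1
    exact ⟨⟨hk0, hkn⟩, hne, e, he,
      by rw [Bool.and_eq_true, beq_iff_eq, beq_iff_eq]; exact ⟨rfl, h2⟩⟩

theorem pv_mem_cands_iff (n : Int) (games : List (Int × Int × List (String × Int)))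
    (player k : Int) : k ∈ pvCands n games player ↔ k ∈ pvNeighbors n games player := by
  rw [pv_mem_neighbors_iff, pvCands]
  simp only [List.mem_map, List.mem_filter, Bool.and_eq_true, bne_iff_ne, beq_iff_eq,
    decide_eq_true_eq]
  constructor
  · rintro ⟨e, ⟨he, ⟨⟨⟨hp, hne⟩, h0⟩, hlt⟩⟩, rfl⟩
    exact ⟨e, he, rfl, hp, hne, h0, hlt⟩
  · rintro ⟨e, he, rfl, hp, hne, h0, hlt⟩
    exact ⟨e, ⟨he, ⟨⟨⟨hp, hne⟩, h0⟩, hlt⟩⟩, rfl⟩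

theorem pv_mem_neighbors_nonneg (n : Int) (games : List (Int × Int × List (String × Int)))
    (player k : Int) (hk : k ∈ pvNeighbors n games player) : 0 ≤ k := by
  have := List.mem_filter.mp hk
  exact (PySem.List.mem_pyRange_one.mp this.1).1

-- with duplicate-free (key, partner) pairs, B's sorted candidate list is A's
-- increasing neighbor scan
theorem pv_sorted_neighbors (n : Int) (games : List (Int × Int × List (String × Int)))
    (player : Int) (hnd : (games.map (fun e => (e.1, e.2.1))).Nodup) :
    PySem.List.sorted (pvCands n games player) (fun x => x) false = pvNeighbors n games player := by
  apply PySem.List.sorted_eq_of_perm_of_pairwise_lt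
  · apply (List.perm_ext_iff_of_nodup ?_ ?_).mpr
    · intro k
      rw [pv_mem_cands_iff]
    · exact (PySem.List.nodup_pyRange_one 0 n).filter _
    · -- candidates are duplicate-free: their (key, partner) pairs are, and the
      -- partner is constantly `player` on the filtered list
      have hsub : ((games.filter (fun e => e.2.1 == player && e.1 != player &&
          decide (0 ≤ e.1) && decide (e.1 < n))).map (fun e => (e.1, e.2.1))).Nodup :=
        hnd.sublist (List.Sublist.map _ List.filter_sublist)
      rw [pvCands]
      rw [show (games.filter (fun e => e.2.1 == player && e.1 != player &&
            decide (0 ≤ e.1) && decide (e.1 < n))).map (fun e => (e.1, e.2.1))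
          = ((games.filter (fun e => e.2.1 == player && e.1 != player &&
            decide (0 ≤ e.1) && decide (e.1 < n))).map (fun e => e.1)).map
              (fun k => (k, player)) from ?_] at hsub
      · exact hsub.of_map _
      · rw [List.map_map]
        apply List.map_congr_left
        intro e he
        have := (List.mem_filter.mp he).2
        simp only [Bool.and_eq_true, beq_iff_eq] at this
        simp [this.1.1.1]
  · exact (PySem.List.pairwise_lt_pyRange_one 0 n).filter _

-- proof-side names for B's table and its value function (definitionally the port's let-bound table)
def pvTableVal (n : Int) (games : List (Int × Int × List (String × Int))) (player : Int)
    (combo : List String) : Int :=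
  (((pvNeighbors n games player).map (fun k => (pvGame? games k player).getD [])).zip combo.tail).foldl
    (fun acc ga => acc + (pvLook ga.1 ((combo.headD "").toList ++ ga.2.toList)).getD 0) 0

def pvTable (n : Int) (games : List (Int × Int × List (String × Int))) (player : Int)
    (pa : List (List String)) : PySem.Dict (List String) Int :=
  (pvProduct (PySem.List.pyGetD pa player [] ::
      (pvNeighbors n games player).map (fun k => PySem.List.pyGetD pa k []))).foldl
    (fun t combo => t.insert combo (pvTableVal n games player combo))
    PySem.Dict.empty

-- A's per-element inner scan
def pvScan (n : Int) (games : List (Int × Int × List (String × Int))) (player : Int)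
    (e : List String) : Int :=
  (PySem.List.pyRange 0 n 1).foldl (fun acc k =>
    if (k != player && (pvGame? games k player).isSome) then
      acc + (pvLook ((pvGame? games k player).getD [])
               [PySem.List.pyGetD (pvJoin e) player ' ', PySem.List.pyGetD (pvJoin e) k ' ']).getD 0
    else acc) 0

-- the relevant sub-assignment key B extracts from a full combination
def pvKey (n : Int) (games : List (Int × Int × List (String × Int))) (player : Int)
    (e : List String) : List String :=
  PySem.List.pyGetD e player "" :: (pvNeighbors n games player).map (fun k => PySem.List.pyGetD e k "")

-- core: for each full combination, A's rescan of all n players equals B's table lookup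
theorem pv_value_eq (n : Int) (games : List (Int × Int × List (String × Int))) (player : Int)
    (pa : List (List String)) (e : List String)
    (he : e ∈ pvProduct pa)
    (hplo : -(pa.length : Int) ≤ player) (hphi : player < pa.length)
    (hkr : ∀ k ∈ pvNeighbors n games player, k < (pa.length : Int))
    (hsingle : ∀ l ∈ pa, ∀ s ∈ l, s.toList.length = 1) :
    pvScan n games player e = ((pvTable n games player pa).get? (pvKey n games player e)).getD 0 := by
  have hlen := (pv_product_spec pa e he).1
  have hesingle := pv_elem_single pa e he hsingle
  rw [pvScan, pv_foldl_if_filter]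
  have hfil : (PySem.List.pyRange 0 n 1).filter
      (fun k => k != player && (pvGame? games k player).isSome) = pvNeighbors n games player := rfl
  rw [hfil, pvTable, pv_table_get?]
  have hmemkey : pvKey n games player e ∈ pvProduct (PySem.List.pyGetD pa player [] ::
      (pvNeighbors n games player).map (fun k => PySem.List.pyGetD pa k [])) := by
    rw [pvKey, pv_mem_product_cons]
    refine ⟨_, _, rfl, pv_elem_getD_mem pa e player he hplo hphi, ?_⟩
    exact pv_map_mem_product _ _ _ (fun k hk =>
      pv_elem_getD_mem pa e k he
        (le_trans (by omega) (pv_mem_neighbors_nonneg n games player k hk)) (hkr k hk))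
  rw [if_pos hmemkey, Option.getD_some, pvTableVal, pvKey]
  simp only [List.headD_cons, List.tail_cons]
  rw [List.zip_map', List.foldl_map]
  apply PySem.List.foldl_congr_mem
  intro acc k hk
  have hk0 := pv_mem_neighbors_nonneg n games player k hk
  have hkhi := hkr k hk
  have h1 := pv_join_getD e player hesingle (by omega) (by omega)
  have h2 := pv_join_getD e k hesingle (by omega) (by omega)
  rw [h1, h2]
  simp

-- ===== VERDICT (by name: the statement is the Claim_ definition above) =====
theorem calculate_single_player_utility_by_graph_spec : Claim_equal_calculate_single_player_utility_by_graph := by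
  intro n games player pa hdom hpre
  unfold Spec_calculate_single_player_utility_by_graph
  unfold calculate_single_player_utility_by_graph calculate_single_player_utility_by_graph_alt
  by_cases hN : pvNeighbors n games player = []
  · have hcands : PySem.List.sorted (pvCands n games player) (fun x => x) false = [] := by
      rw [PySem.List.sorted_eq_nil_iff, List.eq_nil_iff_forall_not_mem]
      intro k hk
      rw [pv_mem_cands_iff, hN] at hk
      exact absurd hk (List.not_mem_nil)
    have hcands' : PySem.List.sorted
        ((games.filter (fun e => e.2.1 == player && e.1 != player &&
          decide (0 ≤ e.1) && decide (e.1 < n))).map (fun e => e.1)) (fun x => x) false = [] := hcands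
    simp only [hcands']
    refine congrArg PySem.Dict.items ?_
    apply PySem.List.foldl_congr_mem
    intro acc e he
    show acc.insert (String.ofList (pvJoin e)) (pvScan n games player e)
      = acc.insert (String.ofList (pvJoin e)) 0
    rw [pvScan, pv_foldl_if_filter]
    have hfil : (PySem.List.pyRange 0 n 1).filter
        (fun k => k != player && (pvGame? games k player).isSome) = pvNeighbors n games player := rfl
    rw [hfil, hN]
    rfl
  · rcases hpre with hpre | ⟨hnd, hplo, hphi, hsingle, hkeys⟩
    · exfalso
      apply hN
      rw [List.eq_nil_iff_forall_not_mem]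
      intro k hk
      obtain ⟨e, he, -, hnb⟩ := (pv_mem_neighbors_iff n games player k).mp hk
      exact hpre e he hnb
    have hkr : ∀ k ∈ pvNeighbors n games player, k < (pa.length : Int) := by
      intro k hk
      obtain ⟨e, he, rfl, hnb⟩ := (pv_mem_neighbors_iff n games player k).mp hk
      exact (hkeys e he hnb).1
    have hcands' : PySem.List.sorted
        ((games.filter (fun e => e.2.1 == player && e.1 != player &&
          decide (0 ≤ e.1) && decide (e.1 < n))).map (fun e => e.1)) (fun x => x) false
        = pvNeighbors n games player := pv_sorted_neighbors n games player hnd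
    simp only [hcands', if_neg hN]
    refine congrArg PySem.Dict.items ?_
    apply PySem.List.foldl_congr_mem
    intro acc e he
    show acc.insert (String.ofList (pvJoin e)) (pvScan n games player e)
      = acc.insert (String.ofList (pvJoin e))
          (((pvTable n games player pa).get? (pvKey n games player e)).getD 0)
    rw [pv_value_eq n games player pa e he hplo hphi hkr hsingle]
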